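-- pv_equiv track=rewrite | github.com/bryanc5864/PRISM | scripts/generate_presentation_figures.py | _get_draw_order
-- ===== SOURCE A (Python) =====
-- DRAW_ORDER = {
--     "skin": ["undetermined", "non_appendage", "eccrine", "hair"],
--     "pancreas": ["undetermined", "non_endocrine", "delta", "alpha", "beta"],
--     "cortex": ["undetermined", "non_neuronal", "deep_layer", "upper_layer"],
--     "hsc": ["undetermined", "lymphoid", "myeloid", "erythroid"],
--     "cardiac": ["undetermined", "non_cardiac", "SHF", "FHF"],
--     "neftel_gbm": ["undetermined", "NPC", "OPC", "AC", "MES"],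
--     "thcell": ["undetermined", "non_thcell", "Th17", "Th1"],
-- }
--
-- def _get_draw_order(system, labels):
--     """Get draw order for a system, falling back to auto-detected order."""
--     if system in DRAW_ORDER:
--         # Filter to only labels that exist in the data
--         known = DRAW_ORDER[system]
--         unique_labels = set(labels)
--         order = [f for f in known if f in unique_labels]
--         # Append any labels not in the predefined order
--         for lab in sorted(unique_labels):
--             if lab not in order:
--                 order.append(lab)
--         return order
--     # Fallback: undetermined first, then alphabetical
--     unique_labels = sorted(set(labels))
--     order = []
--     for bg in ["undetermined", "unknown"]:
--         if bg in unique_labels: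
--             order.append(bg)
--     for lab in unique_labels:
--         if lab not in order:
--             order.append(lab)
--     return order
-- ===== SOURCE B (Python) =====
-- DRAW_ORDER = {
--     "skin": ["undetermined", "non_appendage", "eccrine", "hair"],
--     "pancreas": ["undetermined", "non_endocrine", "delta", "alpha", "beta"],
--     "cortex": ["undetermined", "non_neuronal", "deep_layer", "upper_layer"],
--     "hsc": ["undetermined", "lymphoid", "myeloid", "erythroid"],
--     "cardiac": ["undetermined", "non_cardiac", "SHF", "FHF"],
--     "neftel_gbm": ["undetermined", "NPC", "OPC", "AC", "MES"],
--     "thcell": ["undetermined", "non_thcell", "Th17", "Th1"],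
-- }
--
-- def _get_draw_order(system, labels):
--     """Get draw order for a system: one keyed sort over the distinct labels."""
--     prefix = DRAW_ORDER.get(system, ["undetermined", "unknown"])
--     rank = {lab: i for i, lab in enumerate(prefix)}
--     return sorted(set(labels), key=lambda l: (rank.get(l, len(prefix)), l))
-- ===== Notes on version B (the rewrite author's own statement) =====
-- stated objective: faster
-- what changed: A's two branches of filter-the-prefix then append-missing-labels-in-a-second-loop (whose 'lab not in order' test rescans the growing output list) are replaced by one keyed sort: a rank table built from the system's prefix (or the fallback prefix) and a single sorted(set(labels), key=(rank, label)).
import Mathlib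
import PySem

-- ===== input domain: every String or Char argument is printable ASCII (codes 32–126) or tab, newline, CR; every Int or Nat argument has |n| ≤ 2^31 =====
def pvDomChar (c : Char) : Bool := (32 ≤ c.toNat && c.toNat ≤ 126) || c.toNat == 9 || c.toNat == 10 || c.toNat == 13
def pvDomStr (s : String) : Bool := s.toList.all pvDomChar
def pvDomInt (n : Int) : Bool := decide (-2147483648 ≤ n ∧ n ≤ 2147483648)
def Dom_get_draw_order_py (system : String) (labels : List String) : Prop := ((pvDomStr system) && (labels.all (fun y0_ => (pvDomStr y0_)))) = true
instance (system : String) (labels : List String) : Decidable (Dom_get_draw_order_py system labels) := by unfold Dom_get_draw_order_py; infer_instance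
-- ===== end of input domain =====

-- B replaces A's two branches of filter-then-append-loop (whose membership test rescans
-- the growing output) by a single keyed sort of the distinct labels (rank table from the
-- prefix, alphabetical tail); objective: faster (measured).

-- ===== PORT A =====
def pyDRAW_ORDER : PySem.Dict String (List String) :=
  PySem.Dict.ofList
    [ ("skin", ["undetermined", "non_appendage", "eccrine", "hair"]),
      ("pancreas", ["undetermined", "non_endocrine", "delta", "alpha", "beta"]),
      ("cortex", ["undetermined", "non_neuronal", "deep_layer", "upper_layer"]),
      ("hsc", ["undetermined", "lymphoid", "myeloid", "erythroid"]),
      ("cardiac", ["undetermined", "non_cardiac", "SHF", "FHF"]),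
      ("neftel_gbm", ["undetermined", "NPC", "OPC", "AC", "MES"]),
      ("thcell", ["undetermined", "non_thcell", "Th17", "Th1"]) ]

def get_draw_order_py (system : String) (labels : List String) : List String :=
  if pyDRAW_ORDER.contains system then
    let known := (pyDRAW_ORDER.get? system).getD []
    let unique_labels := PySem.Set.ofList labels
    let order := known.filter (fun f => unique_labels.contains f)
    (PySem.List.sorted unique_labels (fun x => x) false).foldl
      (fun order lab => if order.contains lab then order else order ++ [lab]) order
  else
    let unique_labels := PySem.List.sorted (PySem.Set.ofList labels) (fun x => x) false
    let order := (["undetermined", "unknown"] : List String).foldl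
      (fun order bg => if unique_labels.contains bg then order ++ [bg] else order) []
    unique_labels.foldl
      (fun order lab => if order.contains lab then order else order ++ [lab]) order

-- ===== PORT B =====
def get_draw_order_py_alt (system : String) (labels : List String) : List String :=
  let pre := (pyDRAW_ORDER.get? system).getD ["undetermined", "unknown"]
  let rank := (PySem.List.enumerate pre).foldl
    (fun d p => d.insert p.2 p.1) (PySem.Dict.empty : PySem.Dict String Int)
  PySem.List.sorted2 (PySem.Set.ofList labels)
    (fun l => rank.getD l (pre.length : Int)) (fun l => l) false

-- ===== PRECONDITION & SPEC =====
def Spec_get_draw_order_py (system : String) (labels : List String) (out : List String) : Prop := out = get_draw_order_py_alt system labels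
instance (system : String) (labels : List String) (out : List String) : Decidable (Spec_get_draw_order_py system labels out) := by unfold Spec_get_draw_order_py; infer_instance

-- ===== CLAIM (what is proved, stated in full; the proofs are below) =====
def Claim_equal_get_draw_order_py : Prop := ∀ (system : String) (labels : List String), Dom_get_draw_order_py system labels → Spec_get_draw_order_py system labels (get_draw_order_py system labels)

-- ===== LEMMAS AND PROOFS =====

-- the lexicographic strict order of B's tuple key (k1 l, l)
def pvLex (k1 : String → Int) (a b : String) : Prop :=
  k1 a < k1 b ∨ (k1 a = k1 b ∧ a < b)

lemma pvLex_asymm (k1 : String → Int) (a b : String) (h : pvLex k1 a b) : ¬ pvLex k1 b a := by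
  rcases h with h | ⟨h1, h2⟩ <;> rintro (h' | ⟨h1', h2'⟩)
  · exact lt_asymm h h'
  · exact absurd (h1' ▸ h) (lt_irrefl _)
  · exact absurd (h1 ▸ h') (lt_irrefl _)
  · exact absurd h2 (not_lt_of_gt h2')

lemma pvLex_trans (k1 : String → Int) (a b c : String)
    (h1 : pvLex k1 a b) (h2 : pvLex k1 b c) : pvLex k1 a c := by
  rcases h1 with h1 | ⟨h1, h1'⟩ <;> rcases h2 with h2 | ⟨h2, h2'⟩
  · exact Or.inl (lt_trans h1 h2)
  · exact Or.inl (h2 ▸ h1)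
  · exact Or.inl (h1 ▸ h2)
  · exact Or.inr ⟨h1.trans h2, lt_trans h1' h2'⟩

-- the Bool comparator sorted2 uses, for our keys
lemma pvBefore_iff (k1 : String → Int) (a b : String) :
    (decide (k1 a < k1 b) || !decide (k1 b < k1 a) && decide (a < b)) = true ↔ pvLex k1 a b := by
  unfold pvLex
  simp only [Bool.or_eq_true, Bool.and_eq_true, Bool.not_eq_eq_eq_not, Bool.not_true,
    decide_eq_true_eq, decide_eq_false_iff_not]
  constructor
  · rintro (h | ⟨h1, h2⟩)
    · exact Or.inl h
    · rcases lt_trichotomy (k1 a) (k1 b) with h | h | h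
      · exact Or.inl h
      · exact Or.inr ⟨h, h2⟩
      · exact absurd h h1
  · rintro (h | ⟨h1, h2⟩)
    · exact Or.inl h
    · exact Or.inr ⟨by omega, h2⟩

lemma pvInsertBy_perm (before : String → String → Bool) (x : String) (ys : List String) :
    (PySem.List.insertBy before x ys).Perm (x :: ys) := by
  induction ys with
  | nil => simp [PySem.List.insertBy]
  | cons y ys ih =>
    by_cases h : before x y
    · simp [PySem.List.insertBy, h]
    · simp only [PySem.List.insertBy, h, Bool.false_eq_true, if_false]
      exact (ih.cons y).trans (List.Perm.swap x y ys)

lemma pvInsertBy_pairwise (k1 : String → Int) (x : String) (ys : List String)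
    (hys : ys.Pairwise (fun a b => ¬ pvLex k1 b a)) :
    (PySem.List.insertBy
        (fun a b => decide (k1 a < k1 b) || !decide (k1 b < k1 a) && decide (a < b)) x ys).Pairwise
      (fun a b => ¬ pvLex k1 b a) := by
  induction ys with
  | nil => simp [PySem.List.insertBy]
  | cons y ys ih =>
    rcases List.pairwise_cons.mp hys with ⟨hy, hys'⟩
    by_cases h : (decide (k1 x < k1 y) || !decide (k1 y < k1 x) && decide (x < y)) = true
    · have hxy : pvLex k1 x y := (pvBefore_iff k1 x y).mp h
      simp only [PySem.List.insertBy, h, if_true]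
      refine List.pairwise_cons.mpr ⟨?_, hys⟩
      intro z hz
      rcases List.mem_cons.mp hz with rfl | hz
      · exact pvLex_asymm k1 x _ hxy
      · intro hzx
        exact hy z hz (pvLex_trans k1 z x y hzx hxy)
    · simp only [PySem.List.insertBy, h, Bool.false_eq_true, if_false]
      refine List.pairwise_cons.mpr ⟨?_, ih hys'⟩
      intro z hz
      rcases (PySem.List.mem_insertBy _ x z ys).mp hz with rfl | hz
      · intro hlex
        exact h ((pvBefore_iff k1 z y).mpr hlex)
      · exact hy z hz

lemma pvFoldl_insertBy (k1 : String → Int) (xs : List String) : ∀ (acc : List String),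
    ((xs.foldl (fun a x =>
        PySem.List.insertBy
          (fun a b => decide (k1 a < k1 b) || !decide (k1 b < k1 a) && decide (a < b)) x a) acc).Perm
      (acc ++ xs)) ∧
    (acc.Pairwise (fun a b => ¬ pvLex k1 b a) →
      (xs.foldl (fun a x =>
        PySem.List.insertBy
          (fun a b => decide (k1 a < k1 b) || !decide (k1 b < k1 a) && decide (a < b)) x a) acc).Pairwise
        (fun a b => ¬ pvLex k1 b a)) := by
  induction xs with
  | nil => intro acc; simp
  | cons x xs ih =>
    intro acc
    constructor
    · refine ((ih _).1.trans ?_)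
      refine (((pvInsertBy_perm _ x acc).append_right xs).trans ?_)
      exact List.perm_middle.symm
    · intro hacc
      exact (ih _).2 (pvInsertBy_pairwise k1 x acc hacc)

-- sorted2 with key (k1 l, l) equals any lex-sorted rearrangement of its input
lemma pvSorted2_char (k1 : String → Int) (xs ys : List String)
    (hperm : ys.Perm xs) (hpw : ys.Pairwise (pvLex k1)) :
    PySem.List.sorted2 xs k1 (fun l => l) false = ys := by
  have hdef : PySem.List.sorted2 xs k1 (fun l => l) false
      = xs.foldl (fun a x =>
          PySem.List.insertBy
            (fun a b => decide (k1 a < k1 b) || !decide (k1 b < k1 a) && decide (a < b)) x a) [] := rfl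
  rw [hdef]
  obtain ⟨hp, hw⟩ := pvFoldl_insertBy k1 xs []
  refine List.Perm.eq_of_pairwise (le := fun a b => ¬ pvLex k1 b a) ?_ (hw (by simp)) ?_
      (hp.trans hperm.symm)
  · intro a b _ _ h1 h2
    by_contra hne
    rcases lt_trichotomy (k1 a) (k1 b) with h | h | h
    · exact h2 (Or.inl h)
    · rcases lt_trichotomy a b with h' | h' | h'
      · exact h2 (Or.inr ⟨h, h'⟩)
      · exact hne h'
      · exact h1 (Or.inr ⟨h.symm, h'⟩)
    · exact h1 (Or.inl h)
  · exact hpw.imp (fun {a b} h h' => pvLex_asymm k1 a b h h')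

-- A's append loop over a Nodup source appends exactly the elements missing from the accumulator
lemma pvFoldl_not_mem (xs : List String) (hnd : xs.Nodup) : ∀ (acc : List String),
    xs.foldl (fun order lab => if order.contains lab then order else order ++ [lab]) acc
      = acc ++ xs.filter (fun lab => !acc.contains lab) := by
  induction xs with
  | nil => intro acc; simp
  | cons x xs ih =>
    intro acc
    rcases List.nodup_cons.mp hnd with ⟨hx, hnd'⟩
    by_cases hxa : x ∈ acc
    · have hc : acc.contains x = true := by simpa using hxa
      simp only [List.foldl_cons, hc, if_true]
      rw [ih hnd' acc]
      simp [hxa]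
    · have hc : acc.contains x = false := by simpa using hxa
      simp only [List.foldl_cons, hc, Bool.false_eq_true, if_false]
      rw [ih hnd' (acc ++ [x])]
      have hfil : xs.filter (fun lab => !(acc ++ [x]).contains lab)
          = xs.filter (fun lab => !acc.contains lab) := by
        apply List.filter_congr
        intro a ha
        have hax : a ≠ x := fun h => hx (h ▸ ha)
        simp [hax]
      rw [hfil]
      simp [hxa, List.append_assoc]

-- master lemma: A's two-pass construction equals B's single keyed sort, for any prefix
-- whose rank key k1 increases strictly along the prefix, stays below L on it and is L off it
lemma pvMaster (labels : List String) (pre : List String) (k1 : String → Int) (L : Int)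
    (hnd : pre.Nodup)
    (hmono : pre.Pairwise (fun a b => k1 a < k1 b))
    (hbound : ∀ a ∈ pre, k1 a < L)
    (hout : ∀ l, l ∉ pre → k1 l = L) :
    (PySem.List.sorted (PySem.Set.ofList labels) (fun x => x) false).foldl
        (fun order lab => if order.contains lab then order else order ++ [lab])
        (pre.filter (fun f => (PySem.Set.ofList labels).contains f))
      = PySem.List.sorted2 (PySem.Set.ofList labels) k1 (fun l => l) false := by
  have hndS : (PySem.Set.ofList labels).Nodup := PySem.Set.nodup_ofList labels
  have hndsrt : (PySem.List.sorted (PySem.Set.ofList labels) (fun x => x) false).Nodup :=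
    (PySem.List.sorted_perm (PySem.Set.ofList labels) (fun x => x) false).nodup_iff.mpr hndS
  rw [pvFoldl_not_mem _ hndsrt]
  set S := PySem.Set.ofList labels with hS
  set srt := PySem.List.sorted S (fun x => x) false with hsrt
  set P := pre.filter (fun f => S.contains f) with hP
  set T := srt.filter (fun lab => !P.contains lab) with hT
  have hmemsrt : ∀ x, x ∈ srt ↔ x ∈ S := fun x => PySem.List.mem_sorted S (fun x => x) false x
  have hPmem : ∀ x, x ∈ P ↔ x ∈ pre ∧ x ∈ S := by
    intro x
    constructor
    · intro hx
      rcases List.mem_filter.mp hx with ⟨h1, h2⟩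
      exact ⟨h1, by simpa using h2⟩
    · intro ⟨h1, h2⟩
      exact List.mem_filter.mpr ⟨h1, by simpa using h2⟩
  have hTmem : ∀ x, x ∈ T → x ∈ S ∧ x ∉ pre := by
    intro x hx
    rcases List.mem_filter.mp hx with ⟨h1, h2⟩
    have hxS : x ∈ S := (hmemsrt x).mp h1
    refine ⟨hxS, fun hxpre => ?_⟩
    have : x ∈ P := (hPmem x).mpr ⟨hxpre, hxS⟩
    simp_all
  refine (pvSorted2_char k1 S (P ++ T) ?_ ?_).symm
  · -- (P ++ T).Perm S
    have hndP : P.Nodup := hnd.filter _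
    have hndT : T.Nodup := hndsrt.filter _
    have hdis : ∀ x ∈ P, x ∉ T := by
      intro x hxP hxT
      rcases List.mem_filter.mp hxT with ⟨_, h2⟩
      have : x ∈ P := hxP
      simp_all
    refine (List.perm_ext_iff_of_nodup ?_ hndS).mpr ?_
    · exact List.nodup_append.mpr ⟨hndP, hndT, fun x hx b hb he => hdis x hx (he ▸ hb)⟩
    · intro a
      simp only [List.mem_append]
      constructor
      · rintro (h | h)
        · exact ((hPmem a).mp h).2
        · exact ((hTmem a) h).1
      · intro h
        by_cases hp : a ∈ P
        · exact Or.inl hp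
        · refine Or.inr (List.mem_filter.mpr ⟨(hmemsrt a).mpr h, by simpa using hp⟩)
  · -- (P ++ T).Pairwise (pvLex k1)
    rw [List.pairwise_append]
    refine ⟨?_, ?_, ?_⟩
    · exact (hmono.filter _).imp (fun {a b} h => Or.inl h)
    · have hsrtpw : srt.Pairwise (fun a b => a < b) :=
        PySem.List.sorted_ofList_pairwise_lt labels
      refine (hsrtpw.filter _).imp_of_mem ?_
      intro a b ha hb h
      have hka : k1 a = L := hout a ((hTmem a) ha).2
      have hkb : k1 b = L := hout b ((hTmem b) hb).2
      exact Or.inr ⟨hka.trans hkb.symm, h⟩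
    · intro a ha b hb
      have hka : k1 a < L := hbound a ((hPmem a).mp ha).1
      have hkb : k1 b = L := hout b ((hTmem b) hb).2
      exact Or.inl (hkb ▸ hka)

-- get? of the rank dict is untouched for keys not inserted
lemma pvGet?_foldl_insert (ps : List (Int × String)) (l : String) :
    ∀ (d : PySem.Dict String Int), (∀ p ∈ ps, p.2 ≠ l) →
    (ps.foldl (fun d p => d.insert p.2 p.1) d).get? l = d.get? l := by
  induction ps with
  | nil => intro d _; rfl
  | cons p ps ih =>
    intro d h
    rw [List.foldl_cons, ih _ (fun q hq => h q (by simp [hq]))]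
    exact PySem.Dict.get?_insert_of_ne d p.1 (fun he => h p (by simp) he.symm)

-- the rank key of B defaults to L off the prefix
lemma pvRank_default (pre : List String) (l : String) (L : Int) (h : l ∉ pre) :
    (((PySem.List.enumerate pre).foldl (fun d p => d.insert p.2 p.1)
      (PySem.Dict.empty : PySem.Dict String Int)).getD l L) = L := by
  have hnone : ((PySem.List.enumerate pre).foldl (fun d p => d.insert p.2 p.1)
      (PySem.Dict.empty : PySem.Dict String Int)).get? l = none := by
    rw [pvGet?_foldl_insert _ l _ ?_]
    · exact PySem.Dict.get?_empty l
    · intro p hp he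
      apply h
      rw [← PySem.List.map_snd_enumerate pre 0]
      exact he ▸ List.mem_map.mpr ⟨p, hp, rfl⟩
  simp [PySem.Dict.getD, hnone]

-- one known system: both sides reduce to the master-lemma shapes
lemma pvCase_known (system : String) (labels : List String) (pre : List String)
    (hcon : pyDRAW_ORDER.contains system = true)
    (hget : pyDRAW_ORDER.get? system = some pre)
    (hnd : pre.Nodup)
    (hmono : pre.Pairwise (fun a b =>
      (((PySem.List.enumerate pre).foldl (fun d p => d.insert p.2 p.1)
        (PySem.Dict.empty : PySem.Dict String Int)).getD a (pre.length : Int)) <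
      (((PySem.List.enumerate pre).foldl (fun d p => d.insert p.2 p.1)
        (PySem.Dict.empty : PySem.Dict String Int)).getD b (pre.length : Int))))
    (hbound : ∀ a ∈ pre,
      (((PySem.List.enumerate pre).foldl (fun d p => d.insert p.2 p.1)
        (PySem.Dict.empty : PySem.Dict String Int)).getD a (pre.length : Int)) < (pre.length : Int)) :
    get_draw_order_py system labels = get_draw_order_py_alt system labels := by
  unfold get_draw_order_py get_draw_order_py_alt
  rw [hcon, hget]
  simp only [if_true, Option.getD_some]
  exact pvMaster labels pre _ (pre.length : Int) hnd hmono hbound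
    (fun l hl => pvRank_default pre l _ hl)

-- ===== VERDICT (by name: the statement is the Claim_ definition above) =====
theorem get_draw_order_py_spec : Claim_equal_get_draw_order_py := by
  intro system labels _
  unfold Spec_get_draw_order_py
  by_cases h1 : system = "skin"
  · subst h1
    exact pvCase_known _ labels ["undetermined", "non_appendage", "eccrine", "hair"] (by decide) (by decide) (by decide) (by decide) (by decide)
  by_cases h2 : system = "pancreas"
  · subst h2
    exact pvCase_known _ labels ["undetermined", "non_endocrine", "delta", "alpha", "beta"] (by decide) (by decide) (by decide) (by decide) (by decide)
  by_cases h3 : system = "cortex"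
  · subst h3
    exact pvCase_known _ labels ["undetermined", "non_neuronal", "deep_layer", "upper_layer"] (by decide) (by decide) (by decide) (by decide) (by decide)
  by_cases h4 : system = "hsc"
  · subst h4
    exact pvCase_known _ labels ["undetermined", "lymphoid", "myeloid", "erythroid"] (by decide) (by decide) (by decide) (by decide) (by decide)
  by_cases h5 : system = "cardiac"
  · subst h5
    exact pvCase_known _ labels ["undetermined", "non_cardiac", "SHF", "FHF"] (by decide) (by decide) (by decide) (by decide) (by decide)
  by_cases h6 : system = "neftel_gbm"
  · subst h6
    exact pvCase_known _ labels ["undetermined", "NPC", "OPC", "AC", "MES"] (by decide) (by decide) (by decide) (by decide) (by decide)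
  by_cases h7 : system = "thcell"
  · subst h7
    exact pvCase_known _ labels ["undetermined", "non_thcell", "Th17", "Th1"] (by decide) (by decide) (by decide) (by decide) (by decide)
  -- fallback branch
  · have hmk : pyDRAW_ORDER = PySem.Dict.mk
        [ ("skin", ["undetermined", "non_appendage", "eccrine", "hair"]),
          ("pancreas", ["undetermined", "non_endocrine", "delta", "alpha", "beta"]),
          ("cortex", ["undetermined", "non_neuronal", "deep_layer", "upper_layer"]),
          ("hsc", ["undetermined", "lymphoid", "myeloid", "erythroid"]),
          ("cardiac", ["undetermined", "non_cardiac", "SHF", "FHF"]),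
          ("neftel_gbm", ["undetermined", "NPC", "OPC", "AC", "MES"]),
          ("thcell", ["undetermined", "non_thcell", "Th17", "Th1"]) ] := by rfl
    have hcon : pyDRAW_ORDER.contains system = false := by
      rw [hmk, PySem.Dict.contains_mk]
      simp [Ne.symm h1, Ne.symm h2, Ne.symm h3, Ne.symm h4, Ne.symm h5,
        Ne.symm h6, Ne.symm h7]
    have hget : pyDRAW_ORDER.get? system = none := by
      rw [hmk]
      simp [PySem.Dict.get?, beq_iff_eq, Ne.symm h1, Ne.symm h2,
        Ne.symm h3, Ne.symm h4, Ne.symm h5, Ne.symm h6, Ne.symm h7]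
    unfold get_draw_order_py get_draw_order_py_alt
    rw [hcon, hget]
    simp only [Bool.false_eq_true, if_false, Option.getD_none]
    have hfold := PySem.List.foldl_append_if
      (fun bg => (PySem.List.sorted (PySem.Set.ofList labels) (fun x => x) false).contains bg)
      (fun bg => bg) (["undetermined", "unknown"] : List String) []
    rw [hfold]
    have hcsrt : ∀ bg : String,
        ((PySem.List.sorted (PySem.Set.ofList labels) (fun x => x) false).contains bg)
          = ((PySem.Set.ofList labels).contains bg) := by
      intro bg
      by_cases hbg : bg ∈ PySem.Set.ofList labels
      · simp [List.contains_eq_mem, hbg, (PySem.List.mem_sorted _ _ _ bg).mpr hbg]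
      · simp [List.contains_eq_mem, hbg, (PySem.List.mem_sorted (PySem.Set.ofList labels) (fun x => x) false bg).not.mpr hbg]
    have hfil : List.map (fun bg => bg)
          (List.filter (fun bg =>
            (PySem.List.sorted (PySem.Set.ofList labels) (fun x => x) false).contains bg)
            (["undetermined", "unknown"] : List String))
        = List.filter (fun f => (PySem.Set.ofList labels).contains f)
            (["undetermined", "unknown"] : List String) := by
      rw [List.map_id_fun']
      exact List.filter_congr (fun bg _ => hcsrt bg)
    rw [List.nil_append, hfil]
    exact pvMaster labels ["undetermined", "unknown"] _ _ (by decide) (by decide) (by decide)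
      (fun l hl => pvRank_default _ l _ hl)
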